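-- pv_equiv track=rewrite | github.com/hed-standard/hed-python | hed/tools/analysis/hed_type_factors.py | _count_level_events
-- ===== SOURCE A (Python) =====
-- def _count_level_events(count_list):
--     """ Count the number of events and multiples in a list.
--
--     Parameters:
--         count_list (list): list of integers of the number of times a level occurs in an event.
--
--     Returns:
--         int:   Number of events this level
--     """
--     if not len(count_list):
--         return 0, 0, None
--     number_events = 0
--     number_multiple = 0
--     max_multiple = count_list[0]
--     for index, count in enumerate(count_list):
--         if count_list[index] > 0:
--             number_events = number_events + 1
--         if count_list[index] > 1:
--             number_multiple = number_multiple + 1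
--         if count_list[index] > max_multiple:
--             max_multiple = count_list[index]
--     return number_events, number_multiple, max_multiple
-- ===== SOURCE B (Python) =====
-- def _count_level_events(count_list):
--     if not count_list:
--         return 0, 0, None
--     s = sorted(count_list)
--     n = len(s)
--
--     def rank(x):
--         # binary search: number of elements of s that are <= x
--         lo, hi = 0, n
--         while lo < hi:
--             mid = (lo + hi) // 2
--             if s[mid] <= x:
--                 lo = mid + 1
--             else:
--                 hi = mid
--         return lo
--
--     return n - rank(0), n - rank(1), s[-1]
-- ===== Notes on version B (the rewrite author's own statement) =====
-- stated objective: alternative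
-- what changed: Sorts the list once and derives all three answers from the sorted order: the maximum is the last element and each count is n minus the binary-searched boundary position (rank of 0 resp. 1) instead of A's single stateful Python-level scan with three accumulators.
import Mathlib
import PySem

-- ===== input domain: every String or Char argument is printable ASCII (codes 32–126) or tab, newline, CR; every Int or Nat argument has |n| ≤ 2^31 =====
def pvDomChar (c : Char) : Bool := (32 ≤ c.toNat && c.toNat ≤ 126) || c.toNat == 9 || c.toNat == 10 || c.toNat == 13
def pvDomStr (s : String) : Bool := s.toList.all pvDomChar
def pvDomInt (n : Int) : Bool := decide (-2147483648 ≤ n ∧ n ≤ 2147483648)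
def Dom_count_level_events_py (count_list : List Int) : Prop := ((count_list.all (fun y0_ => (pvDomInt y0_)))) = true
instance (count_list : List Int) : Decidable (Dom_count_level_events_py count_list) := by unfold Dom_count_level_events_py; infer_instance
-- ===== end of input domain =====

-- B sorts the list once and reads all three answers from the sorted order (max = last
-- element, each count = n minus a binary-searched boundary) instead of A's stateful scan.


-- ===== PORT A =====
-- literal transliteration: one loop over the list updating (number_events, number_multiple, max_multiple)
def count_level_events_py (count_list : List Int) : Int × Int × Option Int :=
  match count_list with
  | [] => (0, 0, none)
  | h :: _ =>
    let st := count_list.foldl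
      (fun (s : Int × Int × Int) count =>
        let ne := if count > 0 then s.1 + 1 else s.1
        let nm := if count > 1 then s.2.1 + 1 else s.2.1
        let mx := if count > s.2.2 then count else s.2.2
        (ne, nm, mx))
      (0, 0, h)
    (st.1, st.2.1, some st.2.2)

-- ===== PORT B =====
-- the 'while lo < hi' binary-search loop of Source B's rank(); s[mid] is ported with pyGet?
-- (exact; the .getD 0 default is never reached, since the loop keeps mid in range)
def pvRankLoop (s : List Int) (x lo hi : Int) : Int :=
  if _h : lo < hi then
    let mid := PySem.Int.floordiv (lo + hi) 2
    if (PySem.List.pyGet? s mid).getD 0 ≤ x then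
      pvRankLoop s x (mid + 1) hi
    else
      pvRankLoop s x lo mid
  else lo
termination_by (hi - lo).toNat
decreasing_by
  all_goals
    have := PySem.Int.floordiv_two_mid_bounds (le_of_lt _h)
    have h2 : PySem.Int.floordiv (lo + hi) 2 = (lo + hi) / 2 :=
      PySem.Int.floordiv_eq_ediv_of_pos (by omega)
    simp only [h2] at *
    omega

-- rank(x): number of elements of s that are <= x, found by binary search (Source B's rank)
def pvRank (s : List Int) (x : Int) : Int := pvRankLoop s x 0 (s.length : Int)

-- sort once, then read the three answers off the sorted list (s[-1] ported with pyGet?)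
def count_level_events_py_alt (count_list : List Int) : Int × Int × Option Int :=
  match count_list with
  | [] => (0, 0, none)
  | _ :: _ =>
    let s := PySem.List.sorted count_list (fun x => x) false
    let n : Int := (s.length : Int)
    (n - pvRank s 0, n - pvRank s 1, some ((PySem.List.pyGet? s (-1)).getD 0))

-- ===== PRECONDITION & SPEC =====
def Spec_count_level_events_py (count_list : List Int) (out : Int × Int × Option Int) : Prop := out = count_level_events_py_alt count_list
instance (count_list : List Int) (out : Int × Int × Option Int) : Decidable (Spec_count_level_events_py count_list out) := by unfold Spec_count_level_events_py; infer_instance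

-- ===== CLAIM (what is proved, stated in full; the proofs are below) =====
def Claim_equal_count_level_events_py : Prop := ∀ (count_list : List Int), Dom_count_level_events_py count_list → Spec_count_level_events_py count_list (count_level_events_py count_list)

-- ===== LEMMAS AND PROOFS =====

-- in a sorted list, the elements ≤ x are exactly the first (countP (· ≤ x)) ones
theorem pv_sorted_prefix (s : List Int) (hs : s.Pairwise (· ≤ ·)) (x : Int) :
    ∀ i (hi : i < s.length), (s[i] ≤ x ↔ i < s.countP (fun c => decide (c ≤ x))) := by
  induction s with
  | nil => intro i hi; simp at hi
  | cons a t ih =>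
    rw [List.pairwise_cons] at hs
    intro i hi
    cases i with
    | zero =>
      simp only [List.getElem_cons_zero, List.countP_cons]
      constructor
      · intro h; split_ifs with h' <;> simp_all
      · intro h
        by_contra hax
        have ht : t.countP (fun c => decide (c ≤ x)) = 0 := by
          rw [List.countP_eq_zero]
          intro b hb
          have := hs.1 b hb
          simp; omega
        simp [ht, hax] at h
    | succ j =>
      simp only [List.getElem_cons_succ, List.countP_cons]
      have hj : j < t.length := by simpa using hi
      rw [ih hs.2 j hj]
      by_cases hax : a ≤ x
      · simp [hax]
      · have ht : t.countP (fun c => decide (c ≤ x)) = 0 := by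
          rw [List.countP_eq_zero]
          intro b hb
          have := hs.1 b hb
          simp; omega
        have hgt : ¬ t[j] ≤ x := by
          have := hs.1 _ (t.getElem_mem hj)
          omega
        constructor
        · intro h; omega
        · intro h; simp [ht, hax] at h

-- the binary-search loop lands exactly on k = countP (· ≤ x), given the invariant lo ≤ k ≤ hi
theorem pv_rankLoop_eq (s : List Int) (hs : s.Pairwise (· ≤ ·)) (x : Int) :
    ∀ lo hi : Int, 0 ≤ lo → lo ≤ (s.countP (fun c => decide (c ≤ x)) : Int) →
      (s.countP (fun c => decide (c ≤ x)) : Int) ≤ hi → hi ≤ (s.length : Int) →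
      pvRankLoop s x lo hi = (s.countP (fun c => decide (c ≤ x)) : Int) := by
  intro lo hi
  induction lo, hi using pvRankLoop.induct s x with
  | case1 lo hi hlt mid hle ih =>
    intro h0 hlok hkhi hhi
    rw [pvRankLoop]
    simp only [dif_pos hlt]
    have hmid := PySem.Int.floordiv_two_mid_bounds (le_of_lt hlt)
    have hmid2 : PySem.Int.floordiv (lo + hi) 2 = (lo + hi) / 2 :=
      PySem.Int.floordiv_eq_ediv_of_pos (by omega)
    have hmideq : mid = PySem.Int.floordiv (lo + hi) 2 := rfl
    simp only [hmideq] at hle ih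
    have hmr : 0 ≤ PySem.Int.floordiv (lo + hi) 2 := by omega
    have hmltlen : PySem.Int.floordiv (lo + hi) 2 < (s.length : Int) := by omega
    have hget := PySem.List.pyGet?_eq_some_getElem s hmr hmltlen
    simp only [hget, Option.getD_some] at hle ⊢
    rw [if_pos hle]
    have hch := (pv_sorted_prefix s hs x _ (by omega)).mp hle
    exact ih (by omega) (by omega) hkhi hhi
  | case2 lo hi hlt mid hle ih =>
    intro h0 hlok hkhi hhi
    rw [pvRankLoop]
    simp only [dif_pos hlt]
    have hmid := PySem.Int.floordiv_two_mid_bounds (le_of_lt hlt)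
    have hmid2 : PySem.Int.floordiv (lo + hi) 2 = (lo + hi) / 2 :=
      PySem.Int.floordiv_eq_ediv_of_pos (by omega)
    have hmideq : mid = PySem.Int.floordiv (lo + hi) 2 := rfl
    simp only [hmideq] at hle ih
    have hmr : 0 ≤ PySem.Int.floordiv (lo + hi) 2 := by omega
    have hmltlen : PySem.Int.floordiv (lo + hi) 2 < (s.length : Int) := by omega
    have hget := PySem.List.pyGet?_eq_some_getElem s hmr hmltlen
    simp only [hget, Option.getD_some] at hle ⊢
    rw [if_neg hle]
    have hch : ¬ ((PySem.Int.floordiv (lo + hi) 2).toNat < s.countP (fun c => decide (c ≤ x))) := by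
      intro hc
      exact hle ((pv_sorted_prefix s hs x _ (by omega)).mpr hc)
    exact ih h0 hlok (by omega) (by omega)
  | case3 lo hi hge =>
    intro h0 hlok hkhi hhi
    rw [pvRankLoop]
    simp only [dif_neg hge]
    omega

theorem pv_rank_eq (s : List Int) (hs : s.Pairwise (· ≤ ·)) (x : Int) :
    pvRank s x = (s.countP (fun c => decide (c ≤ x)) : Int) := by
  have hk : s.countP (fun c => decide (c ≤ x)) ≤ s.length := List.countP_le_length
  exact pv_rankLoop_eq s hs x 0 s.length (le_refl 0) (by positivity) (by exact_mod_cast hk) (le_refl _)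

-- splitting the length of a list at a threshold x
theorem pv_count_split (l : List Int) (x : Int) :
    l.length = l.countP (fun c => decide (c ≤ x)) + l.countP (fun c => c > x) := by
  induction l with
  | nil => rfl
  | cons a t ih =>
    simp only [List.length_cons, List.countP_cons]
    split_ifs with h1 h2 h3 <;> simp_all <;> omega

-- A's fold computes the two counts and the running maximum
theorem pv_fold_char (l : List Int) (ne nm mx : Int) :
    l.foldl
      (fun (s : Int × Int × Int) count =>
        let ne := if count > 0 then s.1 + 1 else s.1
        let nm := if count > 1 then s.2.1 + 1 else s.2.1
        let mx := if count > s.2.2 then count else s.2.2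
        (ne, nm, mx))
      (ne, nm, mx)
    = (ne + (l.countP (fun c => c > 0) : Int),
       nm + (l.countP (fun c => c > 1) : Int),
       l.foldl max mx) := by
  induction l generalizing ne nm mx with
  | nil => simp
  | cons a t ih =>
    simp only [List.foldl_cons, List.countP_cons, ih]
    refine Prod.ext ?_ (Prod.ext ?_ ?_) <;> simp only
    · split_ifs with h1 h2 <;> simp_all <;> omega
    · split_ifs with h1 h2 <;> simp_all <;> omega
    · congr 1
      rcases le_or_gt a mx with h | h
      · simp [max_eq_left h, if_neg (not_lt.mpr h)]
      · simp [max_eq_right (le_of_lt h), if_pos h]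

-- foldl max over the list is an element (or the seed) and an upper bound
theorem pv_foldl_max_mem (l : List Int) (mx : Int) : l.foldl max mx = mx ∨ l.foldl max mx ∈ l := by
  induction l generalizing mx with
  | nil => left; rfl
  | cons a t ih =>
    simp only [List.foldl_cons]
    rcases ih (max mx a) with h | h
    · rcases le_or_gt a mx with h' | h'
      · left; rw [h, max_eq_left h']
      · right; rw [h, max_eq_right (le_of_lt h')]; exact List.mem_cons_self
    · right; exact List.mem_cons_of_mem _ h

theorem pv_foldl_max_ub (l : List Int) (mx : Int) :
    mx ≤ l.foldl max mx ∧ ∀ y ∈ l, y ≤ l.foldl max mx := by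
  induction l generalizing mx with
  | nil => exact ⟨le_refl _, by simp⟩
  | cons a t ih =>
    simp only [List.foldl_cons]
    obtain ⟨h1, h2⟩ := ih (max mx a)
    refine ⟨le_trans (le_max_left _ _) h1, ?_⟩
    intro y hy
    rcases List.mem_cons.mp hy with rfl | hy
    · exact le_trans (le_max_right _ _) h1
    · exact h2 y hy

-- the last element of the sorted list equals A's running maximum (seed hd ∈ l)
theorem pv_last_sorted_eq_max (l : List Int) (h : l ≠ []) (hd : Int) (hhd : hd ∈ l) :
    (PySem.List.pyGet? (PySem.List.sorted l (fun x => x) false) (-1)).getD 0 = l.foldl max hd := by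
  set s := PySem.List.sorted l (fun x => x) false with hsdef
  have hperm : s.Perm l := PySem.List.sorted_perm l (fun x => x) false
  have hsne : s ≠ [] := by
    intro hnil; rw [hnil] at hperm; exact h hperm.symm.eq_nil
  rw [PySem.List.pyGet?_neg_one, List.getLast?_eq_some_getLast hsne, Option.getD_some]
  have hpw : s.Pairwise (· ≤ ·) := by
    have := PySem.List.sorted_pairwise l (fun x => x)
    simpa [hsdef] using this
  have hub : ∀ y ∈ s, y ≤ s.getLast hsne := by
    intro y hy
    rw [List.getLast_eq_getElem]
    obtain ⟨i, hi, rfl⟩ := List.getElem_of_mem hy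
    rcases Nat.lt_or_ge i (s.length - 1) with hlt | hge
    · exact List.pairwise_iff_getElem.mp hpw i (s.length - 1) hi (by omega) hlt
    · have : i = s.length - 1 := by omega
      subst this; exact le_refl _
  obtain ⟨hseed, hall⟩ := pv_foldl_max_ub l hd
  apply le_antisymm
  · exact hall _ (hperm.mem_iff.mp (List.getLast_mem hsne))
  · rcases pv_foldl_max_mem l hd with hm | hm
    · rw [hm]; exact hub hd (hperm.mem_iff.mpr hhd)
    · exact hub _ (hperm.mem_iff.mpr hm)

-- ===== VERDICT (by name: the statement is the Claim_ definition above) =====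
theorem count_level_events_py_spec : Claim_equal_count_level_events_py := by
  intro l _
  unfold Spec_count_level_events_py count_level_events_py count_level_events_py_alt
  match l with
  | [] => rfl
  | h :: t =>
    simp only [pv_fold_char, zero_add]
    set s := PySem.List.sorted (h :: t) (fun x => x) false with hsdef
    have hperm : s.Perm (h :: t) := PySem.List.sorted_perm (h :: t) (fun x => x) false
    have hpw : s.Pairwise (· ≤ ·) := by
      have := PySem.List.sorted_pairwise (h :: t) (fun x => x)
      simpa [hsdef] using this
    have hlen : s.length = (h :: t).length := hperm.length_eq
    have hr0 := pv_rank_eq s hpw 0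
    have hr1 := pv_rank_eq s hpw 1
    have hc0 : s.countP (fun c => decide (c ≤ (0:Int))) = (h :: t).countP (fun c => decide (c ≤ (0:Int))) :=
      hperm.countP_eq _
    have hc1 : s.countP (fun c => decide (c ≤ (1:Int))) = (h :: t).countP (fun c => decide (c ≤ (1:Int))) :=
      hperm.countP_eq _
    have hsplit0 := pv_count_split (h :: t) 0
    have hsplit1 := pv_count_split (h :: t) 1
    have hlast := pv_last_sorted_eq_max (h :: t) (by simp) h List.mem_cons_self
    rw [← hsdef] at hlast
    refine Prod.ext ?_ (Prod.ext ?_ ?_)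
    · show _ = (s.length : Int) - pvRank s 0
      rw [hr0, hc0, hlen]; push_cast; omega
    · show _ = (s.length : Int) - pvRank s 1
      rw [hr1, hc1, hlen]; push_cast; omega
    · show some ((h :: t).foldl max h) = _
      rw [hlast]
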